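-- pv_equiv track=rewrite | github.com/AlyonaCIA/Astar-Island-Oracle | query_strategy_analysis.py | compute_tile_grid
-- ===== SOURCE A (Python) =====
-- def compute_tile_grid(width, height, max_tile=15):
--     """Non-overlapping partition. 9 tiles for 40x40."""
--     x_specs, y_specs = [], []
--     x = 0
--     while x < width:
--         w = min(max_tile, width - x)
--         x_specs.append((x, w))
--         x += w
--     y = 0
--     while y < height:
--         h = min(max_tile, height - y)
--         y_specs.append((y, h))
--         y += h
--     return [(tx, ty, tw, th) for (ty, th) in y_specs for (tx, tw) in x_specs]
-- ===== SOURCE B (Python) =====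
-- def compute_tile_grid(width, height, max_tile=15):
--     """Non-overlapping partition. 9 tiles for 40x40."""
--     nx = (width + max_tile - 1) // max_tile if width > 0 else 0
--     ny = (height + max_tile - 1) // max_tile if height > 0 else 0
--     return [(i * max_tile, j * max_tile,
--              min(max_tile, width - i * max_tile),
--              min(max_tile, height - j * max_tile))
--             for j in range(ny) for i in range(nx)]
-- ===== Notes on version B (the rewrite author's own statement) =====
-- stated objective: alternative
-- what changed: Replaced the two accumulator while-loops (x += w) by closed-form index arithmetic: tile counts via ceiling division, each offset computed as i*max_tile inside one nested comprehension.
import Mathlib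
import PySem

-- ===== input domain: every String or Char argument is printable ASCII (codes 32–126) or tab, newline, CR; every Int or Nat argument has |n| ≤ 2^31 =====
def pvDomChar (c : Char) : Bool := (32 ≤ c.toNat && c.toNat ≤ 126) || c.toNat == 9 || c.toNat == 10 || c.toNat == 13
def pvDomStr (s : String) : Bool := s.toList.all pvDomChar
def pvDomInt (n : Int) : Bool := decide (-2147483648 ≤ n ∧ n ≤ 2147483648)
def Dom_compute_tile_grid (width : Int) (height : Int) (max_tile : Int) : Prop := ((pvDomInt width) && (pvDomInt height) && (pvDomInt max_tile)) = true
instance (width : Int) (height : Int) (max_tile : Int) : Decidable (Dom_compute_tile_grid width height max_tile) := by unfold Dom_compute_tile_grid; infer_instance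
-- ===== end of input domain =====

-- B replaces A's accumulator while-loops by closed-form index arithmetic (ceil-division tile
-- counts, offset = i*max_tile); same output, same cost. Pre_ excludes inputs where A loops forever.


-- ===== PORT A =====
-- the while-loop 'while x < dim: w = min(max_tile, dim-x); append (x,w); x += w';
-- the 'else []' branch is only a totality guard for the case 0 < w fails, where Python diverges
def tileSpecs (dim : Int) (max_tile : Int) (x : Int) : List (Int × Int) :=
  if h : x < dim then
    let w := min max_tile (dim - x)
    if hw0 : 0 < w then (x, w) :: tileSpecs dim max_tile (x + w)
    else []
  else []
termination_by (dim - x).toNat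
decreasing_by omega

def compute_tile_grid (width : Int) (height : Int) (max_tile : Int) : List (Int × Int × Int × Int) :=
  let x_specs := tileSpecs width max_tile 0
  let y_specs := tileSpecs height max_tile 0
  y_specs.flatMap (fun yt => x_specs.map (fun xt => (xt.1, yt.1, xt.2, yt.2)))

-- ===== PORT B =====
def compute_tile_grid_alt (width : Int) (height : Int) (max_tile : Int) : List (Int × Int × Int × Int) :=
  let nx : Int := if width > 0 then PySem.Int.floordiv (width + max_tile - 1) max_tile else 0
  let ny : Int := if height > 0 then PySem.Int.floordiv (height + max_tile - 1) max_tile else 0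
  (PySem.List.pyRange 0 ny 1).flatMap (fun j =>
    (PySem.List.pyRange 0 nx 1).map (fun i =>
      (i * max_tile, j * max_tile, min max_tile (width - i * max_tile), min max_tile (height - j * max_tile))))

-- ===== PRECONDITION & SPEC =====
-- Pre_ excludes exactly the inputs on which A never returns: max_tile ≤ 0 with a positive dimension
-- makes A's while-loop add a non-positive step forever.
def Pre_compute_tile_grid (width : Int) (height : Int) (max_tile : Int) : Prop :=
  0 < max_tile ∨ (width ≤ 0 ∧ height ≤ 0)
instance (width : Int) (height : Int) (max_tile : Int) : Decidable (Pre_compute_tile_grid width height max_tile) := by unfold Pre_compute_tile_grid; infer_instance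
def pvWitness_compute_tile_grid : Int × Int × Int := (40, 40, 15)

def Spec_compute_tile_grid (width : Int) (height : Int) (max_tile : Int) (out : List (Int × Int × Int × Int)) : Prop := out = compute_tile_grid_alt width height max_tile
instance (width : Int) (height : Int) (max_tile : Int) (out : List (Int × Int × Int × Int)) : Decidable (Spec_compute_tile_grid width height max_tile out) := by unfold Spec_compute_tile_grid; infer_instance

-- ===== CLAIM (what is proved, stated in full; the proofs are below) =====
def Claim_equal_compute_tile_grid : Prop := ∀ (width : Int) (height : Int) (max_tile : Int), Dom_compute_tile_grid width height max_tile → Pre_compute_tile_grid width height max_tile → Spec_compute_tile_grid width height max_tile (compute_tile_grid width height max_tile)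

-- ===== LEMMAS AND PROOFS =====

-- A's loop from x = k*mt equals B's mapped range from k, whenever nx satisfies the ceiling bracket
lemma tileSpecs_eq_map_range (dim mt : Int) (hmt : 0 < mt) (nx : Int)
    (hnx : ∀ k : Int, 0 ≤ k → (k < nx ↔ k * mt < dim)) :
    ∀ k : Int, 0 ≤ k →
      tileSpecs dim mt (k * mt) =
        (PySem.List.pyRange k nx 1).map (fun i => (i * mt, min mt (dim - i * mt))) := by
  intro k hk
  by_cases hlt : k * mt < dim
  · have hkn : k < nx := (hnx k hk).mpr hlt
    rw [PySem.List.pyRange_one_cons hkn, List.map_cons]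
    rw [tileSpecs]
    simp only [hlt, dite_true]
    have hw : 0 < min mt (dim - k * mt) := by omega
    simp only [hw, dite_true]
    by_cases hfull : k * mt + mt ≤ dim
    · -- full tile: w = mt, recurse at (k+1)*mt
      have hmin : min mt (dim - k * mt) = mt := by omega
      rw [hmin]
      have : k * mt + mt = (k + 1) * mt := by ring
      rw [this, tileSpecs_eq_map_range dim mt hmt nx hnx (k + 1) (by omega)]
    · -- partial last tile: w = dim - k*mt, next x = dim, both sides end
      have hmin : min mt (dim - k * mt) = dim - k * mt := by omega
      rw [hmin]
      have hx : k * mt + (dim - k * mt) = dim := by ring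
      rw [hx, tileSpecs]
      simp only [lt_irrefl, dite_false]
      have hnk : nx ≤ k + 1 := by
        by_contra hc
        have := (hnx (k + 1) (by omega)).mp (by omega)
        nlinarith
      rw [PySem.List.pyRange_one_eq_nil hnk, List.map_nil]
  · have hkn : ¬ k < nx := fun h => hlt ((hnx k hk).mp h)
    rw [tileSpecs]
    simp only [hlt, dite_false]
    rw [PySem.List.pyRange_one_eq_nil (by omega), List.map_nil]
termination_by k => (dim - k * mt).toNat
decreasing_by
  have h1 : (k + 1) * mt = k * mt + mt := by ring
  omega

lemma axis_eq (dim mt : Int) (hmt : 0 < mt) :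
    tileSpecs dim mt 0 =
      (PySem.List.pyRange 0 (if dim > 0 then PySem.Int.floordiv (dim + mt - 1) mt else 0) 1).map
        (fun i => (i * mt, min mt (dim - i * mt))) := by
  have hnx : ∀ k : Int, 0 ≤ k →
      (k < (if dim > 0 then PySem.Int.floordiv (dim + mt - 1) mt else 0) ↔ k * mt < dim) := by
    intro k hk
    by_cases hd : dim > 0
    · simp only [hd, if_true]
      rw [PySem.Int.floordiv_eq_ediv_of_pos hmt]
      constructor
      · intro h
        have h2 : (k + 1) * mt ≤ ((dim + mt - 1) / mt) * mt := by
          exact mul_le_mul_of_nonneg_right (by omega) (by omega)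
        have h3 : ((dim + mt - 1) / mt) * mt ≤ dim + mt - 1 := Int.ediv_mul_le _ (by omega)
        nlinarith
      · intro h
        have : k ≤ (dim + mt - 1) / mt := by
          rw [Int.le_ediv_iff_mul_le hmt]; omega
        by_contra hc
        have heq : k = (dim + mt - 1) / mt := by omega
        have h3 : ((dim + mt - 1) / mt) * mt ≤ dim + mt - 1 := Int.ediv_mul_le _ (by omega)
        have h4 : dim + mt - 1 < ((dim + mt - 1) / mt + 1) * mt :=
          Int.lt_ediv_add_one_mul_self _ hmt
        rw [← heq] at h3 h4
        nlinarith
    · simp only [hd, if_false]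
      constructor
      · omega
      · intro h; nlinarith
  have h := tileSpecs_eq_map_range dim mt hmt _ hnx 0 le_rfl
  simpa using h

lemma loop_empty (dim mt : Int) (hd : dim ≤ 0) : tileSpecs dim mt 0 = [] := by
  rw [tileSpecs]; simp only [dite_eq_right_iff]; intro h; omega

-- ===== VERDICT (by name: the statement is the Claim_ definition above) =====
theorem compute_tile_grid_spec : Claim_equal_compute_tile_grid := by
  intro width height max_tile _ hpre
  unfold Spec_compute_tile_grid compute_tile_grid compute_tile_grid_alt
  rcases hpre with hmt | ⟨hw, hh⟩
  · dsimp only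
    rw [axis_eq width max_tile hmt, axis_eq height max_tile hmt]
    simp only [List.flatMap_map, List.map_map]
    rfl
  · rw [loop_empty width max_tile hw, loop_empty height max_tile hh]
    simp [show ¬ width > 0 by omega, show ¬ height > 0 by omega,
      PySem.List.pyRange_one_eq_nil (le_refl (0:Int))]
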